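-- pv_equiv track=rewrite | github.com/anup00900/infer-ai | backend/forward_testing/augmenter/md_augmenter.py | _condense_update
-- ===== SOURCE A (Python) =====
-- def _condense_update(update: str) -> str:
--     """Keep headlines and tables, trim blockquoted article bodies."""
--     lines = update.split("\n")
--     condensed = []
--     in_blockquote = False
--     quote_lines = 0
--
--     for line in lines:
--         if line.strip().startswith("> "):
--             if not in_blockquote:
--                 in_blockquote = True
--                 quote_lines = 0
--             quote_lines += 1
--             # Keep first 3 lines of each blockquote (enough context)
--             if quote_lines <= 3:
--                 condensed.append(line)
--         else:
--             in_blockquote = False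
--             quote_lines = 0
--             condensed.append(line)
--
--     return "\n".join(condensed)
-- ===== SOURCE B (Python) =====
-- def _condense_update(update: str) -> str:
--     """Keep headlines and tables, trim blockquoted article bodies."""
--     lines = update.split("\n")
--     q = [l.strip().startswith("> ") for l in lines]
--     keep = [l for l, a, b, c, d in
--             zip(lines, q, [False] + q, [False, False] + q, [False, False, False] + q)
--             if not (a and b and c and d)]
--     return "\n".join(keep)
-- ===== Notes on version B (the rewrite author's own statement) =====
-- stated objective: alternative
-- what changed: Replaced the running in_blockquote/quote_lines state machine with a stateless pass: compute the blockquote mask once, zip each line with the mask shifted by 0..3 positions, and keep a line unless it and its three predecessors are all quote lines.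
import Mathlib
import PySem

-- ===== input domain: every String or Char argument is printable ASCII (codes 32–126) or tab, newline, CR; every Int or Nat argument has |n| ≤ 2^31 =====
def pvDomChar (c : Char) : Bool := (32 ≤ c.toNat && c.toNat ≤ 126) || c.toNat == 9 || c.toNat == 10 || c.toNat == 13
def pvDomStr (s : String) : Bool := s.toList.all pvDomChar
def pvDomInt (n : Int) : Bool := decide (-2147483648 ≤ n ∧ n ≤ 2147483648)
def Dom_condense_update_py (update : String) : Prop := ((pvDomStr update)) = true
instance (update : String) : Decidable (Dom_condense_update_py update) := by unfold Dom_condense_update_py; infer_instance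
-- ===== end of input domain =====

-- B replaces A's running in_blockquote/quote_lines state machine with a stateless
-- mask-and-shifted-zip pass (alternative decomposition, same cost).

-- ===== PORT A =====
-- the body of A's for-loop, on state (condensed, in_blockquote, quote_lines)
def pvStepA (st : List String × Bool × Int) (line : String) : List String × Bool × Int :=
  if PySem.Str.startswith (PySem.Str.strip line) "> " then
    let quote_lines := (if !st.2.1 then 0 else st.2.2) + 1
    (if quote_lines ≤ 3 then st.1 ++ [line] else st.1, true, quote_lines)
  else
    (st.1 ++ [line], false, 0)

def condense_update_py (update : String) : String :=
  let lines := (PySem.Str.split? update "\n").getD []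
  let st := lines.foldl pvStepA ([], false, 0)
  PySem.Str.join "\n" st.1

-- ===== PORT B =====
-- B's comprehension: the zipped tuple (((line, a), b), c), d), its filter condition and its projection
def pvKeep (p : (((String × Bool) × Bool) × Bool) × Bool) : Bool :=
  !(p.1.1.1.2 && p.1.1.2 && p.1.2 && p.2)

def pvLine (p : (((String × Bool) × Bool) × Bool) × Bool) : String := p.1.1.1.1

def condense_update_py_alt (update : String) : String :=
  let lines := (PySem.Str.split? update "\n").getD []
  let q := lines.map (fun l => PySem.Str.startswith (PySem.Str.strip l) "> ")
  let keep := ((((((lines.zip q).zip (false :: q)).zip (false :: false :: q)).zip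
      (false :: false :: false :: q)).filter pvKeep).map pvLine)
  PySem.Str.join "\n" keep

-- ===== PRECONDITION & SPEC =====
def Spec_condense_update_py (update : String) (out : String) : Prop := out = condense_update_py_alt update
instance (update : String) (out : String) : Decidable (Spec_condense_update_py update out) := by unfold Spec_condense_update_py; infer_instance

-- ===== CLAIM (what is proved, stated in full; the proofs are below) =====
def Claim_equal_condense_update_py : Prop := ∀ (update : String), Dom_condense_update_py update → Spec_condense_update_py update (condense_update_py update)

-- ===== LEMMAS AND PROOFS =====

def pvIsQ (l : String) : Bool := PySem.Str.startswith (PySem.Str.strip l) "> "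

-- A's kept lines, as a structural recursion over the remaining lines and A's state
def pvKeptA : List String → Bool → Int → List String
  | [], _, _ => []
  | l :: t, inb, q =>
    if pvIsQ l then
      if (if !inb then 0 else q) + 1 ≤ 3 then l :: pvKeptA t true ((if !inb then 0 else q) + 1)
      else pvKeptA t true ((if !inb then 0 else q) + 1)
    else l :: pvKeptA t false 0

-- B's kept lines, recursively: b1 b2 b3 are the quote-mask bits of the 1..3 previous lines
def pvKeptB : List String → Bool → Bool → Bool → List String
  | [], _, _, _ => []
  | l :: t, b1, b2, b3 =>
    if pvIsQ l && b1 && b2 && b3 then pvKeptB t (pvIsQ l) b1 b2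
    else l :: pvKeptB t (pvIsQ l) b1 b2

theorem pvStepA_quote (st : List String × Bool × Int) (l : String) (h : pvIsQ l = true) :
    pvStepA st l = (if (if !st.2.1 then 0 else st.2.2) + 1 ≤ 3 then st.1 ++ [l] else st.1, true,
      (if !st.2.1 then 0 else st.2.2) + 1) := by
  have h' : PySem.Chars.startswith (PySem.Chars.strip l.toList) ['>', ' '] = true := by
    simpa [pvIsQ] using h
  simp [pvStepA, h']

theorem pvStepA_plain (st : List String × Bool × Int) (l : String) (h : pvIsQ l = false) :
    pvStepA st l = (st.1 ++ [l], false, 0) := by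
  have h' : PySem.Chars.startswith (PySem.Chars.strip l.toList) ['>', ' '] = false := by
    simpa [pvIsQ] using h
  simp [pvStepA, h']

theorem pvFoldA (t : List String) (acc : List String) (inb : Bool) (q : Int) :
    (t.foldl pvStepA (acc, inb, q)).1 = acc ++ pvKeptA t inb q := by
  induction t generalizing acc inb q with
  | nil => simp [pvKeptA]
  | cons l t ih =>
    rw [List.foldl_cons]
    cases h : pvIsQ l with
    | true =>
      rw [pvStepA_quote _ _ h]
      by_cases h3 : (if !inb then (0:Int) else q) + 1 ≤ 3
      · rw [if_pos h3, ih, show pvKeptA (l :: t) inb q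
            = l :: pvKeptA t true ((if !inb then 0 else q) + 1) by
          simp only [pvKeptA]
          rw [if_pos h, if_pos h3]]
        simp
      · rw [if_neg h3, ih, show pvKeptA (l :: t) inb q
            = pvKeptA t true ((if !inb then 0 else q) + 1) by
          simp only [pvKeptA]
          rw [if_pos h, if_neg h3]]
    | false =>
      rw [pvStepA_plain _ _ h, ih, show pvKeptA (l :: t) inb q = l :: pvKeptA t false 0 by
        simp only [pvKeptA]
        rw [if_neg (by simp [h])]]
      simp

theorem pvZipB (t : List String) (b1 b2 b3 : Bool) :
    (((((t.zip (t.map pvIsQ)).zip (b1 :: t.map pvIsQ)).zip (b2 :: b1 :: t.map pvIsQ)).zip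
        (b3 :: b2 :: b1 :: t.map pvIsQ)).filter pvKeep).map pvLine
      = pvKeptB t b1 b2 b3 := by
  induction t generalizing b1 b2 b3 with
  | nil => simp [pvKeptB]
  | cons l t ih =>
    rw [List.map_cons, List.zip_cons_cons, List.zip_cons_cons, List.zip_cons_cons,
      List.zip_cons_cons, List.filter_cons]
    have hk : pvKeep ((((l, pvIsQ l), b1), b2), b3) = !(pvIsQ l && b1 && b2 && b3) := rfl
    by_cases h : pvIsQ l && b1 && b2 && b3
    · rw [hk, h, show pvKeptB (l :: t) b1 b2 b3 = pvKeptB t (pvIsQ l) b1 b2 by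
        simp [pvKeptB, h]]
      simp only [Bool.not_true, Bool.false_eq_true, if_false]
      exact ih _ _ _
    · rw [hk, show pvKeptB (l :: t) b1 b2 b3 = l :: pvKeptB t (pvIsQ l) b1 b2 by
        simp [pvKeptB, h],
        show (!(pvIsQ l && b1 && b2 && b3)) = true by simp [h]]
      rw [if_pos rfl, List.map_cons, ih]
      rfl

-- the state-machine/mask invariant: inb mirrors the previous line's mask bit and
-- quote_lines counts the trailing quote run whose mask bits are b1 b2 b3
def pvInv (inb : Bool) (q : Int) (b1 b2 b3 : Bool) : Prop :=
  inb = b1 ∧ (b1 = true → 1 ≤ q ∧ (2 ≤ q ↔ b2 = true) ∧ (3 ≤ q ↔ (b2 && b3) = true))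

theorem pvAB (t : List String) (inb : Bool) (q : Int) (b1 b2 b3 : Bool)
    (h : pvInv inb q b1 b2 b3) : pvKeptA t inb q = pvKeptB t b1 b2 b3 := by
  induction t generalizing inb q b1 b2 b3 with
  | nil => rfl
  | cons l t ih =>
    obtain ⟨h1, h2⟩ := h
    subst h1
    by_cases hq : pvIsQ l
    · cases hb : inb with
      | true =>
        subst hb
        obtain ⟨hq1, hq2, hq3⟩ := h2 rfl
        rw [show pvKeptA (l :: t) true q =
            (if q + 1 ≤ 3 then l :: pvKeptA t true (q + 1) else pvKeptA t true (q + 1)) by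
          simp only [pvKeptA]
          rw [if_pos hq]
          norm_num]
        by_cases hk : q + 1 ≤ 3
        · have hb23 : (b2 && b3) = false := by
            cases hx : b2 && b3
            · rfl
            · exact absurd (hq3.mpr hx) (by omega)
          rw [if_pos hk,
            show pvKeptB (l :: t) true b2 b3 = l :: pvKeptB t (pvIsQ l) true b2 by
              simp [pvKeptB, hq, hb23]]
          have hnext : pvInv true (q + 1) (pvIsQ l) true b2 := by
            refine ⟨by simp [hq], fun _ => ⟨by omega, ⟨fun _ => rfl, fun _ => by omega⟩, ?_⟩⟩
            constructor
            · intro h3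
              simp [hq2.mp (by omega)]
            · intro h3
              simp only [Bool.true_and] at h3
              have := hq2.mpr h3
              omega
          rw [ih _ _ _ _ _ hnext]
        · have hb23 : (b2 && b3) = true := hq3.mp (by omega)
          simp only [Bool.and_eq_true] at hb23
          rw [if_neg hk,
            show pvKeptB (l :: t) true b2 b3 = pvKeptB t (pvIsQ l) true b2 by
              simp [pvKeptB, hq, hb23.1, hb23.2]]
          have hnext : pvInv true (q + 1) (pvIsQ l) true b2 := by
            refine ⟨by simp [hq], fun _ => ⟨by omega, ⟨fun _ => rfl, fun _ => by omega⟩, ?_⟩⟩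
            constructor
            · intro _; simp [hb23.1]
            · intro _
              have := hq2.mpr hb23.1
              omega
          rw [ih _ _ _ _ _ hnext]
      | false =>
        subst hb
        rw [show pvKeptA (l :: t) false q = l :: pvKeptA t true 1 by
          simp only [pvKeptA]
          rw [if_pos hq]
          norm_num,
          show pvKeptB (l :: t) false b2 b3 = l :: pvKeptB t (pvIsQ l) false b2 by
            simp [pvKeptB]]
        have hnext : pvInv true 1 (pvIsQ l) false b2 := by
          refine ⟨by simp [hq], fun _ => ⟨by omega, ?_, ?_⟩⟩
          · constructor
            · intro h3; omega
            · intro h3; cases h3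
          · constructor
            · intro h3; omega
            · intro h3; simp at h3
        rw [ih _ _ _ _ _ hnext]
    · have hq' : pvIsQ l = false := by simpa using hq
      rw [show pvKeptA (l :: t) inb q = l :: pvKeptA t false 0 by
          simp only [pvKeptA]
          rw [if_neg (by simp [hq'])],
        show pvKeptB (l :: t) inb b2 b3 = l :: pvKeptB t (pvIsQ l) inb b2 by
          simp [pvKeptB, hq']]
      rw [ih false 0 (pvIsQ l) inb b2 ⟨hq'.symm, fun hh => absurd hh (by simp [hq'])⟩]

-- ===== VERDICT (by name: the statement is the Claim_ definition above) =====
theorem condense_update_py_spec : Claim_equal_condense_update_py := by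
  intro update _
  unfold Spec_condense_update_py condense_update_py condense_update_py_alt
  dsimp only
  rw [pvFoldA _ [] false 0, List.nil_append]
  have e : (fun l => PySem.Str.startswith (PySem.Str.strip l) "> ") = pvIsQ := rfl
  rw [e, pvZipB ((PySem.Str.split? update "\n").getD []) false false false, pvAB _ false 0 false false false ⟨rfl, fun h => by cases h⟩]
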